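-- pv_equiv track=rewrite | github.com/medu1122/learn | string_reversal.py | find_reversal_string
-- ===== SOURCE A (Python) =====
-- def reverse_string(s):
--     return s[::-1]
--
-- def check(s,r):
--     min_strings=[]
--     for i in range(len(s)):
--         if r[i]=='1':
--             min_strings.append(reverse_string(s[i]))
--         else:
--             min_strings.append(s[i])
--     for i in range(len(min_strings)-1):
--         if min_strings[i]>min_strings[i+1]:
--             return False
--     return True
--
-- def find_reversal_string(s):
--     n=len(s)
--     min_reversal ='1' * n
--     for i in range(2**n):
--         r=bin(i)[2:].zfill(n)
--         if check(s,r)and r<min_reversal: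
--             min_reversal=r
--     return min_reversal
-- ===== SOURCE B (Python) =====
-- def find_reversal_string(s):
--     n = len(s)
--     vals = [(x, x[::-1]) for x in s]
--     # feas[i] = (f0, f1): fb says the suffix starting at i can be made
--     # non-decreasing when position i takes value vals[i][b].
--     feas = [None] * n
--     for i in range(n - 1, -1, -1):
--         if i == n - 1:
--             feas[i] = (True, True)
--         else:
--             nv, nf = vals[i + 1], feas[i + 1]
--             def ok(v):
--                 return (v <= nv[0] and nf[0]) or (v <= nv[1] and nf[1])
--             feas[i] = (ok(vals[i][0]), ok(vals[i][1]))
--     bits = []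
--     prev = ""
--     for i in range(n):
--         if prev <= vals[i][0] and feas[i][0]:
--             bits.append('0')
--             prev = vals[i][0]
--         elif prev <= vals[i][1] and feas[i][1]:
--             bits.append('1')
--             prev = vals[i][1]
--         else:
--             return '1' * n
--     return ''.join(bits)
-- ===== Notes on version B (the rewrite author's own statement) =====
-- stated objective: faster
-- what changed: A enumerates all 2^n reversal masks and keeps the lexicographically smallest one that sorts the list; B computes a right-to-left feasibility table (can each position's reversed/unreversed value still be extended to a sorted suffix) and then greedily picks the smallest feasible bit left to right, which yields the same minimal mask in polynomial time.
import Mathlib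
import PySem

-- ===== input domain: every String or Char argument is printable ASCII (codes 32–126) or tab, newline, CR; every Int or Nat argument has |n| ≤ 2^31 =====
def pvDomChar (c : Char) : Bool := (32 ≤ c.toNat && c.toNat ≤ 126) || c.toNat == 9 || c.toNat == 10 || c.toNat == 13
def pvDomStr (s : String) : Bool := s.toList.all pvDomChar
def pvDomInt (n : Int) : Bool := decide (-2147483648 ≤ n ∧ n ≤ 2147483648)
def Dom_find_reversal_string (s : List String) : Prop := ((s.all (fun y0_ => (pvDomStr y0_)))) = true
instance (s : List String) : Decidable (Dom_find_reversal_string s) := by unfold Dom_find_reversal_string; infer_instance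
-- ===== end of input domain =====

-- B replaces A's exhaustive scan of all 2^n reversal masks by a greedy
-- left-to-right bit choice backed by a right-to-left feasibility pass.

-- ===== PORT A =====
-- s[::-1]; the step -1 is never 0, so slice? always returns some
def pvRevA (x : List Char) : List Char := (PySem.Chars.slice? x none none (-1)).getD []

def pvCheck (s : List (List Char)) (r : List Char) : Bool :=
  let ms := (List.range s.length).foldl
    (fun acc i => if r.getD i ' ' = '1' then acc ++ [pvRevA (s.getD i [])] else acc ++ [s.getD i []]) []
  (List.range (ms.length - 1)).all fun i => !decide (ms.getD (i+1) [] < ms.getD i [])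

def find_reversal_string (s : List String) : String :=
  let sl := s.map String.toList
  let n := sl.length
  String.ofList ((List.range (2 ^ n)).foldl
    (fun m (i : Nat) =>
      let r := PySem.Chars.zfill (PySem.Int.toBinChars (i : Int)) (n : Int)
      if pvCheck sl r && decide (r < m) then r else m)
    (List.replicate n '1'))

-- ===== PORT B =====
def pvRevB (x : List Char) : List Char := (PySem.Chars.slice? x none none (-1)).getD []

-- feas[i] = (the suffix from i can be finished with s[i] unreversed, … reversed), built right-to-left
def pvFeas : List (List Char × List Char) → List (Bool × Bool)
  | [] => []
  | [_] => [(true, true)]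
  | v :: w :: rest =>
    let fr := pvFeas (w :: rest)
    let nf := fr.headD (true, true)
    ((decide (v.1 ≤ w.1) && nf.1) || (decide (v.1 ≤ w.2) && nf.2),
     (decide (v.2 ≤ w.1) && nf.1) || (decide (v.2 ≤ w.2) && nf.2)) :: fr

-- greedy left-to-right: smallest feasible bit at each position
def pvGo : List Char → List (List Char × List Char) → List (Bool × Bool) → Option (List Char)
  | _, [], _ => some []
  | prev, v :: vs, fs =>
    let f := fs.headD (true, true)
    if decide (prev ≤ v.1) && f.1 then (pvGo v.1 vs fs.tail).map (fun cs => '0' :: cs)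
    else if decide (prev ≤ v.2) && f.2 then (pvGo v.2 vs fs.tail).map (fun cs => '1' :: cs)
    else none

def find_reversal_string_alt (s : List String) : String :=
  let vals := s.map fun x => (x.toList, pvRevB x.toList)
  match pvGo [] vals (pvFeas vals) with
  | some cs => String.ofList cs
  | none => String.ofList (List.replicate s.length '1')

-- ===== PRECONDITION & SPEC =====
def Spec_find_reversal_string (s : List String) (out : String) : Prop := out = find_reversal_string_alt s
instance (s : List String) (out : String) : Decidable (Spec_find_reversal_string s out) := by unfold Spec_find_reversal_string; infer_instance

-- ===== CLAIM (what is proved, stated in full; the proofs are below) =====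
def Claim_equal_find_reversal_string : Prop := ∀ (s : List String), Dom_find_reversal_string s → Spec_find_reversal_string s (find_reversal_string s)

-- ===== LEMMAS AND PROOFS =====

-- value taken by a position under a mask bit
def pvPick (v : List Char × List Char) (b : Bool) : List Char := if b then v.2 else v.1

-- mask bs applied to values vs yields a non-decreasing chain whose head is ≥ prev
def pvValid : List Char → List Bool → List (List Char × List Char) → Bool
  | _, [], [] => true
  | prev, b :: bs, v :: vs => decide (prev ≤ pvPick v b) && pvValid (pvPick v b) bs vs
  | _, _, _ => false

-- some valid mask exists
def pvCan : List Char → List (List Char × List Char) → Bool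
  | _, [] => true
  | prev, v :: vs => (decide (prev ≤ v.1) && pvCan v.1 vs) || (decide (prev ≤ v.2) && pvCan v.2 vs)

def pvEnc (bs : List Bool) : List Char := bs.map fun b => if b then '1' else '0'

-- bin(i)[2:], recursively
def pvBinAux (n : Nat) : List Char :=
  if _h : n < 2 then [Nat.digitChar n]
  else pvBinAux (n / 2) ++ [Nat.digitChar (n % 2)]
  decreasing_by omega

-- fixed-width big-endian binary
def pvPadw : Nat → Nat → List Char
  | 0, _ => []
  | n+1, i => pvPadw n (i / 2) ++ [Nat.digitChar (i % 2)]

def pvBits : Nat → Nat → List Bool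
  | 0, _ => []
  | n+1, i => pvBits n (i / 2) ++ [decide (i % 2 = 1)]

def pvVal (bs : List Bool) : Nat := bs.foldl (fun a b => 2 * a + (if b then 1 else 0)) 0

lemma pv_nil_le (l : List Char) : ([] : List Char) ≤ l := by
  cases l with
  | nil => exact le_refl _
  | cons c t => exact le_of_lt (List.nil_lt_cons c t)

lemma pv_cons_le_cons (c : Char) {l m : List Char} (h : l ≤ m) : c :: l ≤ c :: m := by
  rcases lt_or_eq_of_le h with h | h
  · exact le_of_lt (by rw [List.cons_lt_cons_iff]; exact Or.inr ⟨rfl, h⟩)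
  · rw [h]

lemma pvCan_iff (vs : List (List Char × List Char)) : ∀ (prev : List Char),
    pvCan prev vs = true ↔ ∃ bs, pvValid prev bs vs = true := by
  induction vs with
  | nil => intro prev; simp [pvCan]; exact ⟨[], rfl⟩
  | cons v vs ih =>
    intro prev
    constructor
    · intro h
      simp [pvCan] at h
      rcases h with ⟨h1, h2⟩ | ⟨h1, h2⟩
      · rcases (ih v.1).mp h2 with ⟨bs, hbs⟩
        exact ⟨false :: bs, by simp [pvValid, pvPick, h1, hbs]⟩
      · rcases (ih v.2).mp h2 with ⟨bs, hbs⟩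
        exact ⟨true :: bs, by simp [pvValid, pvPick, h1, hbs]⟩
    · rintro ⟨bs, hbs⟩
      cases bs with
      | nil => simp [pvValid] at hbs
      | cons b bs =>
        simp [pvValid] at hbs
        cases b with
        | false =>
          simp [pvPick] at hbs
          simp [pvCan]; exact Or.inl ⟨hbs.1, (ih v.1).mpr ⟨bs, hbs.2⟩⟩
        | true =>
          simp [pvPick] at hbs
          simp [pvCan]; exact Or.inr ⟨hbs.1, (ih v.2).mpr ⟨bs, hbs.2⟩⟩

lemma pvValid_length : ∀ (bs : List Bool) (vs : List (List Char × List Char)) (prev : List Char),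
    pvValid prev bs vs = true → bs.length = vs.length := by
  intro bs
  induction bs with
  | nil => intro vs prev h; cases vs with
    | nil => rfl
    | cons v vs => simp [pvValid] at h
  | cons b bs ih => intro vs prev h; cases vs with
    | nil => simp [pvValid] at h
    | cons v vs =>
      simp [pvValid] at h
      simpa using ih vs _ h.2

lemma pvFeas_cons (v : List Char × List Char) (vs : List (List Char × List Char)) :
    pvFeas (v :: vs) = (pvCan v.1 vs, pvCan v.2 vs) :: pvFeas vs := by
  induction vs generalizing v with
  | nil => simp [pvFeas, pvCan]
  | cons w rest ih =>
    show pvFeas (v :: w :: rest) = _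
    rw [pvFeas]
    rw [ih w]
    simp [pvCan]

lemma pvGo_cons (prev : List Char) (v : List Char × List Char) (vs : List (List Char × List Char)) :
    pvGo prev (v :: vs) (pvFeas (v :: vs)) =
      if decide (prev ≤ v.1) && pvCan v.1 vs then (pvGo v.1 vs (pvFeas vs)).map (fun cs => '0' :: cs)
      else if decide (prev ≤ v.2) && pvCan v.2 vs then (pvGo v.2 vs (pvFeas vs)).map (fun cs => '1' :: cs)
      else none := by
  rw [pvFeas_cons, pvGo]
  simp

lemma pvGo_isSome (vs : List (List Char × List Char)) : ∀ (prev : List Char),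
    (pvGo prev vs (pvFeas vs)).isSome = pvCan prev vs := by
  induction vs with
  | nil => intro prev; simp [pvGo, pvCan]
  | cons v vs ih =>
    intro prev
    rw [pvGo_cons]
    by_cases h1 : decide (prev ≤ v.1) && pvCan v.1 vs
    · rw [if_pos h1]
      simp only [Option.isSome_map]
      rw [ih v.1]
      simp only [Bool.and_eq_true] at h1
      simp [pvCan, h1.1, h1.2]
    · rw [if_neg h1]
      by_cases h2 : decide (prev ≤ v.2) && pvCan v.2 vs
      · rw [if_pos h2]
        simp only [Option.isSome_map]
        rw [ih v.2]
        simp only [Bool.and_eq_true] at h2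
        simp [pvCan, h2.1, h2.2]
      · rw [if_neg h2]
        simp only [Bool.not_eq_true] at h1 h2
        show (none : Option (List Char)).isSome = pvCan prev (v :: vs)
        simp [pvCan, h1, h2]

lemma pvGo_valid (vs : List (List Char × List Char)) : ∀ (prev cs : List Char),
    pvGo prev vs (pvFeas vs) = some cs →
    ∃ bs, cs = pvEnc bs ∧ pvValid prev bs vs = true := by
  induction vs with
  | nil => intro prev cs h
           simp [pvGo] at h
           exact ⟨[], by simp [← h, pvEnc], rfl⟩
  | cons v vs ih =>
    intro prev cs h
    rw [pvGo_cons] at h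
    split_ifs at h with h1 h2
    · simp only [Option.map_eq_some_iff] at h
      rcases h with ⟨cs0, hgo, rfl⟩
      rcases ih v.1 cs0 hgo with ⟨bs, rfl, hv⟩
      simp only [Bool.and_eq_true] at h1
      exact ⟨false :: bs, by simp [pvEnc], by simp [pvValid, pvPick, h1.1, hv]⟩
    · simp only [Option.map_eq_some_iff] at h
      rcases h with ⟨cs0, hgo, rfl⟩
      rcases ih v.2 cs0 hgo with ⟨bs, rfl, hv⟩
      simp only [Bool.and_eq_true] at h2
      exact ⟨true :: bs, by simp [pvEnc], by simp [pvValid, pvPick, h2.1, hv]⟩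

lemma pvGo_min (vs : List (List Char × List Char)) : ∀ (prev cs : List Char) (bs' : List Bool),
    pvGo prev vs (pvFeas vs) = some cs → pvValid prev bs' vs = true →
    ¬ (pvEnc bs' < cs) := by
  induction vs with
  | nil =>
    intro prev cs bs' h hv
    cases bs' with
    | nil => simp [pvGo] at h; simp [← h, pvEnc]
    | cons b bs => simp [pvValid] at hv
  | cons v vs ih =>
    intro prev cs bs' h hv
    cases bs' with
    | nil => simp [pvValid] at hv
    | cons b' bs' =>
      simp only [pvValid, Bool.and_eq_true, decide_eq_true_eq] at hv
      rw [pvGo_cons] at h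
      split_ifs at h with h1 h2
      · -- greedy took '0'
        simp only [Option.map_eq_some_iff] at h
        rcases h with ⟨cs0, hgo, rfl⟩
        cases b' with
        | false =>
          simp only [pvPick] at hv
          intro hlt
          rw [pvEnc, List.map_cons] at hlt
          simp only [List.cons_lt_cons_iff] at hlt
          rcases hlt with hlt | ⟨-, hlt⟩
          · exact absurd hlt (by decide)
          · exact ih v.1 cs0 bs' hgo hv.2 hlt
        | true =>
          intro hlt
          rw [pvEnc, List.map_cons] at hlt
          simp only [List.cons_lt_cons_iff] at hlt
          rcases hlt with hlt | ⟨he, -⟩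
          · exact absurd hlt (by decide)
          · exact absurd he (by decide)
      · -- greedy took '1'; a valid mask cannot start with '0' here
        simp only [Option.map_eq_some_iff] at h
        rcases h with ⟨cs0, hgo, rfl⟩
        cases b' with
        | false =>
          simp only [pvPick] at hv
          exact absurd (by
            simp only [Bool.and_eq_true, decide_eq_true_eq]
            exact ⟨hv.1, (pvCan_iff vs v.1).mpr ⟨bs', hv.2⟩⟩) h1
        | true =>
          simp only [pvPick] at hv
          intro hlt
          rw [pvEnc, List.map_cons] at hlt
          simp only [List.cons_lt_cons_iff] at hlt
          rcases hlt with hlt | ⟨-, hlt⟩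
          · exact absurd hlt (by decide)
          · exact ih v.2 cs0 bs' hgo hv.2 hlt

lemma pvMapRange_zip : ∀ (sl : List (List Char)) (bs : List Bool), bs.length = sl.length →
    List.map (fun i => if (pvEnc bs).getD i ' ' = '1' then pvRevA (sl.getD i []) else sl.getD i [])
        (List.range sl.length) =
      List.zipWith (fun x b => if b then pvRevA x else x) sl bs := by
  intro sl
  induction sl with
  | nil => simp
  | cons x sl ih =>
    intro bs hlen
    cases bs with
    | nil => simp at hlen
    | cons b bs =>
      simp only [List.length_cons, Nat.succ_inj] at hlen
      simp only [List.length_cons, List.range_succ_eq_map, List.map_cons, List.map_map]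
      rw [List.zipWith_cons_cons]
      congr 1
      · cases b <;> simp [pvEnc]
      · rw [← ih bs hlen]
        apply List.map_congr_left
        intro i _
        simp [pvEnc, Function.comp]

lemma pvCheck_ms (sl : List (List Char)) (bs : List Bool) (hlen : bs.length = sl.length) :
    (List.range sl.length).foldl
      (fun acc i => if (pvEnc bs).getD i ' ' = '1' then acc ++ [pvRevA (sl.getD i [])] else acc ++ [sl.getD i []]) [] =
    List.zipWith (fun x b => if b then pvRevA x else x) sl bs := by
  have hstep : (fun (acc : List (List Char)) i => if (pvEnc bs).getD i ' ' = '1' then acc ++ [pvRevA (sl.getD i [])] else acc ++ [sl.getD i []])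
      = fun acc i => acc ++ [if (pvEnc bs).getD i ' ' = '1' then pvRevA (sl.getD i []) else sl.getD i []] := by
    funext acc i; split_ifs <;> rfl
  rw [hstep, PySem.List.foldl_append_singleton_eq_map]
  simp only [List.nil_append]
  exact pvMapRange_zip sl bs hlen

lemma pvChain_all (ms : List (List Char)) :
    ((List.range (ms.length - 1)).all fun i => !decide (ms.getD (i+1) [] < ms.getD i [])) = true ↔
    List.IsChain (· ≤ ·) ms := by
  rw [List.isChain_iff_getElem]
  simp only [List.all_eq_true, List.mem_range]
  constructor
  · intro h i hi
    have h' := h i (by omega)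
    rw [List.getD_eq_getElem _ _ (by omega), List.getD_eq_getElem _ _ (by omega)] at h'
    simpa using h'
  · intro h i hi
    have h' := h i (by omega)
    rw [List.getD_eq_getElem _ _ (by omega), List.getD_eq_getElem _ _ (by omega)]
    simpa using h'

lemma pvValid_chain : ∀ (vs : List (List Char × List Char)) (bs : List Bool) (prev : List Char),
    (pvValid prev bs vs = true ↔
      bs.length = vs.length ∧ List.IsChain (· ≤ ·) (prev :: List.zipWith pvPick vs bs)) := by
  intro vs
  induction vs with
  | nil => intro bs prev; cases bs with
    | nil => simp [pvValid]
    | cons b bs => simp [pvValid]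
  | cons v vs ih =>
    intro bs prev
    cases bs with
    | nil => simp [pvValid]
    | cons b bs =>
      simp only [pvValid, Bool.and_eq_true, decide_eq_true_eq, List.zipWith_cons_cons,
        List.length_cons, Nat.succ_inj, List.isChain_cons_cons]
      rw [ih bs (pvPick v b)]
      tauto

lemma pvChain_nil_cons (l : List (List Char)) :
    List.IsChain (· ≤ ·) (([] : List Char) :: l) ↔ List.IsChain (· ≤ ·) l := by
  cases l with
  | nil => simp
  | cons m t =>
    rw [List.isChain_cons_cons]
    exact ⟨fun h => h.2, fun h => ⟨pv_nil_le m, h⟩⟩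

-- A's check of an n-bit mask string is B's chain validity of the mask
lemma pvCheck_iff (sl : List (List Char)) (bs : List Bool) (hlen : bs.length = sl.length) :
    pvCheck sl (pvEnc bs) = pvValid [] bs (sl.map fun x => (x, pvRevB x)) := by
  rw [Bool.eq_iff_iff]
  have hzip : List.zipWith (fun x b => if b then pvRevA x else x) sl bs
      = List.zipWith pvPick (sl.map fun x => (x, pvRevB x)) bs := by
    rw [List.zipWith_map_left]; rfl
  unfold pvCheck
  simp only [pvCheck_ms sl bs hlen, hzip]
  rw [pvChain_all]
  rw [pvValid_chain, pvChain_nil_cons]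
  constructor
  · intro h; exact ⟨by simp [hlen], h⟩
  · intro h; exact h.2

-- A's fold keeps the least passing candidate seen, never above its start
lemma pvFold_char (sl : List (List Char)) : ∀ (L : List (List Char)) (m0 : List Char),
    (L.foldl (fun m r => if pvCheck sl r && decide (r < m) then r else m) m0 = m0 ∨
      (L.foldl (fun m r => if pvCheck sl r && decide (r < m) then r else m) m0 ∈ L ∧
       pvCheck sl (L.foldl (fun m r => if pvCheck sl r && decide (r < m) then r else m) m0) = true)) ∧
    L.foldl (fun m r => if pvCheck sl r && decide (r < m) then r else m) m0 ≤ m0 ∧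
    (∀ r ∈ L, pvCheck sl r = true →
      L.foldl (fun m r => if pvCheck sl r && decide (r < m) then r else m) m0 ≤ r) := by
  intro L
  induction L with
  | nil => intro m0; refine ⟨Or.inl rfl, le_refl _, by simp⟩
  | cons r L ih =>
    intro m0
    simp only [List.foldl_cons]
    by_cases hc : pvCheck sl r && decide (r < m0)
    · rw [if_pos hc]
      simp only [Bool.and_eq_true, decide_eq_true_eq] at hc
      rcases ih r with ⟨io, ile, imin⟩
      refine ⟨?_, le_trans ile (le_of_lt hc.2), ?_⟩
      · rcases io with h | h
        · exact Or.inr ⟨List.mem_cons.mpr (Or.inl h), by rw [h]; exact hc.1⟩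
        · exact Or.inr ⟨List.mem_cons.mpr (Or.inr h.1), h.2⟩
      · intro r' hr' hcr'
        rcases List.mem_cons.mp hr' with rfl | hr'
        · exact ile
        · exact imin r' hr' hcr'
    · rw [if_neg hc]
      rcases ih m0 with ⟨io, ile, imin⟩
      refine ⟨?_, ile, ?_⟩
      · rcases io with h | h
        · exact Or.inl h
        · exact Or.inr ⟨List.mem_cons.mpr (Or.inr h.1), h.2⟩
      · intro r' hr' hcr'
        rcases List.mem_cons.mp hr' with rfl | hr'
        · have hnlt : ¬ r' < m0 := fun hlt => hc (by simp [hcr', hlt])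
          exact le_trans ile (not_lt.mp hnlt)
        · exact imin r' hr' hcr'

lemma pvBinAux_toDigitsCore : ∀ (f n : Nat) (acc : List Char), n < f →
    Nat.toDigitsCore 2 f n acc = pvBinAux n ++ acc := by
  intro f
  induction f with
  | zero => intro n acc h; omega
  | succ f ih =>
    intro n acc h
    rw [Nat.toDigitsCore]
    by_cases h2 : n / 2 = 0
    · simp only [h2, if_true]
      have hn2 : n < 2 := by omega
      rw [pvBinAux, dif_pos hn2]
      simp [Nat.mod_eq_of_lt hn2]
    · simp only [h2, if_false]
      rw [ih (n / 2) _ (by omega)]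
      conv_rhs => rw [pvBinAux, dif_neg (by omega : ¬ n < 2)]
      simp

lemma pvBinAux_eq_toBin (i : Nat) : PySem.Int.toBinChars (i : Int) = pvBinAux i := by
  unfold PySem.Int.toBinChars
  rw [if_neg (by omega)]
  have : ((i : Int)).toNat = i := Int.toNat_natCast i
  rw [this]
  unfold Nat.toDigits
  rw [pvBinAux_toDigitsCore (i + 1) i [] (by omega)]
  simp

lemma pvBinAux_shape (i : Nat) : ∃ t, pvBinAux i = '0' :: t ∨ pvBinAux i = '1' :: t := by
  induction i using Nat.strong_induction_on with
  | _ i ih =>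
    by_cases h : i < 2
    · rw [pvBinAux, dif_pos h]
      interval_cases i
      · exact ⟨[], Or.inl rfl⟩
      · exact ⟨[], Or.inr rfl⟩
    · rw [pvBinAux, dif_neg h]
      rcases ih (i / 2) (by omega) with ⟨t, ht | ht⟩
      · exact ⟨t ++ [Nat.digitChar (i % 2)], Or.inl (by rw [ht]; rfl)⟩
      · exact ⟨t ++ [Nat.digitChar (i % 2)], Or.inr (by rw [ht]; rfl)⟩

lemma pvZfill_eq (c : Char) (rest : List Char) (w : Nat)
    (hc : ¬ (c = '+' ∨ c = '-')) :
    PySem.Chars.zfill (c :: rest) (w : Int) =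
      List.replicate (w - (c :: rest).length) '0' ++ (c :: rest) := by
  unfold PySem.Chars.zfill
  by_cases h : (w : Int) ≤ ((c :: rest).length : Int)
  · rw [if_pos h]
    have : w - (c :: rest).length = 0 := by omega
    rw [this]
    rfl
  · rw [if_neg h]
    simp only [if_neg hc]
    have : (w : Int).toNat = w := Int.toNat_natCast w
    rw [this]

lemma pvPadw_zero (n : Nat) : pvPadw n 0 = List.replicate n '0' := by
  induction n with
  | zero => rfl
  | succ n ih =>
    rw [pvPadw, ih, List.replicate_succ']
    rfl

lemma pvZfill_padw (i : Nat) : ∀ n, i < 2 ^ (n + 1) →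
    PySem.Chars.zfill (pvBinAux i) ((n + 1 : Nat) : Int) = pvPadw (n + 1) i := by
  induction i using Nat.strong_induction_on with
  | _ i ih =>
    intro n hlt
    by_cases h : i < 2
    · rw [pvBinAux, dif_pos h]
      rw [pvZfill_eq _ _ _ (by interval_cases i <;> decide)]
      rw [pvPadw]
      have h0 : i / 2 = 0 := by omega
      have h1 : i % 2 = i := by omega
      rw [h0, h1, pvPadw_zero]
      simp
    · have hn : 1 ≤ n := by
        by_contra hc
        have : n = 0 := by omega
        subst this; simp at hlt; omega
      obtain ⟨m, rfl⟩ : ∃ m, n = m + 1 := ⟨n - 1, by omega⟩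
      rw [pvBinAux, dif_neg h]
      rcases pvBinAux_shape (i / 2) with ⟨t, ht⟩
      have hshape : ∃ c tt, pvBinAux (i / 2) = c :: tt ∧ ¬ (c = '+' ∨ c = '-') := by
        rcases ht with ht | ht
        · exact ⟨'0', t, ht, by decide⟩
        · exact ⟨'1', t, ht, by decide⟩
      rcases hshape with ⟨c, tt, hct, hc⟩
      have hih := ih (i / 2) (by omega) m (by
        have : 2 ^ (m + 2) = 2 ^ (m + 1) * 2 := by rw [pow_succ]
        omega)
      rw [hct] at hih ⊢
      rw [pvZfill_eq _ _ _ hc] at hih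
      have hcons : c :: tt ++ [Nat.digitChar (i % 2)] = c :: (tt ++ [Nat.digitChar (i % 2)]) := rfl
      rw [hcons, pvZfill_eq _ _ _ hc]
      rw [pvPadw, ← hih]
      simp only [List.length_cons, List.length_append, List.length_nil]
      have harith : m + 1 + 1 - (tt.length + (0 + 1) + 1) = m + 1 - (tt.length + 1) := by omega
      rw [harith]
      simp

lemma pvPadw_enc : ∀ (n i : Nat), pvPadw n i = pvEnc (pvBits n i) ∧ (pvBits n i).length = n := by
  intro n
  induction n with
  | zero => intro i; exact ⟨rfl, rfl⟩
  | succ n ih =>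
    intro i
    rcases ih (i / 2) with ⟨h1, h2⟩
    constructor
    · rw [pvPadw, pvBits, h1, pvEnc, pvEnc, List.map_append]
      congr 1
      rcases Nat.mod_two_eq_zero_or_one i with h | h <;> simp [h, Nat.digitChar]
    · rw [pvBits]
      simp [h2]

lemma pvVal_append (bs : List Bool) (b : Bool) :
    pvVal (bs ++ [b]) = 2 * pvVal bs + (if b then 1 else 0) := by
  unfold pvVal
  rw [List.foldl_append]
  rfl

lemma pvVal_spec (bs : List Bool) :
    pvPadw bs.length (pvVal bs) = pvEnc bs ∧ pvVal bs < 2 ^ bs.length := by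
  induction bs using List.reverseRecOn with
  | nil => exact ⟨rfl, by decide⟩
  | append_singleton bs b ih =>
    rcases ih with ⟨h1, h2⟩
    rw [pvVal_append]
    constructor
    · have hlen : (bs ++ [b]).length = bs.length + 1 := by simp
      rw [hlen, pvPadw]
      have hdiv : (2 * pvVal bs + (if b then 1 else 0)) / 2 = pvVal bs := by
        cases b <;> simp only [Bool.false_eq_true, if_true, if_false] <;> omega
      have hmod : (2 * pvVal bs + (if b then 1 else 0)) % 2 = (if b then 1 else 0) := by
        cases b <;> simp only [Bool.false_eq_true, if_true, if_false] <;> omega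
      rw [hdiv, hmod, h1, pvEnc, pvEnc, List.map_append]
      congr 1
      cases b <;> simp [Nat.digitChar]
    · have : (bs ++ [b]).length = bs.length + 1 := by simp
      rw [this, pow_succ]
      cases b <;> simp only [Bool.false_eq_true, if_true, if_false] <;> omega

lemma pvEnc_le_ones : ∀ (bs : List Bool), pvEnc bs ≤ List.replicate bs.length '1' := by
  intro bs
  induction bs with
  | nil => exact le_refl _
  | cons b bs ih =>
    rw [pvEnc, List.map_cons, List.length_cons, List.replicate_succ]
    cases b
    · apply le_of_lt
      rw [List.cons_lt_cons_iff]
      exact Or.inl (by decide)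
    · exact pv_cons_le_cons _ ih

-- the n-bit encodings are exactly A's enumerated candidate strings (n ≥ 1)
lemma pvEnum_mem (n : Nat) (hn : 1 ≤ n) (bs : List Bool) (hlen : bs.length = n) :
    pvEnc bs ∈ (List.range (2 ^ n)).map
      (fun i : Nat => PySem.Chars.zfill (PySem.Int.toBinChars (i : Int)) (n : Int)) := by
  obtain ⟨m, rfl⟩ : ∃ m, n = m + 1 := ⟨n - 1, by omega⟩
  rcases pvVal_spec bs with ⟨h1, h2⟩
  refine List.mem_map.mpr ⟨pvVal bs, List.mem_range.mpr (show pvVal bs < 2 ^ (m + 1) by rw [← hlen]; exact h2), ?_⟩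
  rw [pvBinAux_eq_toBin, pvZfill_padw _ _ (by rw [← hlen]; exact h2), ← hlen, h1]

lemma pvEnum_shape (n : Nat) (hn : 1 ≤ n) (r : List Char)
    (hr : r ∈ (List.range (2 ^ n)).map
      (fun i : Nat => PySem.Chars.zfill (PySem.Int.toBinChars (i : Int)) (n : Int))) :
    ∃ bs, bs.length = n ∧ r = pvEnc bs := by
  obtain ⟨m, rfl⟩ : ∃ m, n = m + 1 := ⟨n - 1, by omega⟩
  rcases List.mem_map.mp hr with ⟨i, hi, rfl⟩
  rw [List.mem_range] at hi
  rcases pvPadw_enc (m + 1) i with ⟨h1, h2⟩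
  exact ⟨pvBits (m + 1) i, h2, by rw [pvBinAux_eq_toBin, pvZfill_padw _ _ hi, h1]⟩

-- unfolded forms of the two ports
lemma pvA_eq (s : List String) :
    find_reversal_string s = String.ofList
      (((List.range (2 ^ (s.map String.toList).length)).map
        (fun i : Nat => PySem.Chars.zfill (PySem.Int.toBinChars (i : Int)) (((s.map String.toList).length : Nat) : Int))).foldl
        (fun m r => if pvCheck (s.map String.toList) r && decide (r < m) then r else m)
        (List.replicate (s.map String.toList).length '1')) := by
  unfold find_reversal_string
  rw [List.foldl_map]

lemma pvB_eq (s : List String) :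
    find_reversal_string_alt s =
      match pvGo [] ((s.map String.toList).map fun x => (x, pvRevB x))
          (pvFeas ((s.map String.toList).map fun x => (x, pvRevB x))) with
      | some cs => String.ofList cs
      | none => String.ofList (List.replicate s.length '1') := by
  unfold find_reversal_string_alt
  rw [List.map_map]
  rfl

-- ===== VERDICT (by name: the statement is the Claim_ definition above) =====
theorem find_reversal_string_spec : Claim_equal_find_reversal_string := by
  intro s _
  show find_reversal_string s = find_reversal_string_alt s
  by_cases hne : s = []
  · subst hne; rfl
  · set sl := s.map String.toList with hsl
    have hn : 1 ≤ sl.length := by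
      rw [hsl, List.length_map]
      exact List.length_pos_of_ne_nil hne
    set n := sl.length with hn'
    set vals := sl.map (fun x => (x, pvRevB x)) with hvals
    set L := (List.range (2 ^ n)).map
      (fun i : Nat => PySem.Chars.zfill (PySem.Int.toBinChars (i : Int)) (n : Int)) with hL
    set m0 := List.replicate n '1' with hm0
    set res := L.foldl (fun m r => if pvCheck sl r && decide (r < m) then r else m) m0 with hres
    have hvlen : vals.length = n := by rw [hvals, List.length_map]
    have hslen : s.length = n := by rw [hn', hsl]; simp
    rw [pvA_eq, pvB_eq]
    rcases hfold : pvGo [] vals (pvFeas vals) with _ | cs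
    · -- no valid mask exists: A's fold never updates
      have hcan : pvCan [] vals = false := by
        have := pvGo_isSome vals []
        rw [hfold] at this
        simpa using this.symm
      have hnone : ∀ r ∈ L, pvCheck sl r = false := by
        intro r hr
        rcases pvEnum_shape n hn r hr with ⟨bs, hlen, rfl⟩
        rw [pvCheck_iff sl bs (by rw [hlen, hn'])]
        rw [← Bool.not_eq_true]
        intro hv
        have : pvCan [] vals = true := (pvCan_iff vals []).mpr ⟨bs, hv⟩
        rw [this] at hcan; exact Bool.noConfusion hcan
      have hres0 : res = m0 := by
        rcases (pvFold_char sl L m0).1 with h | h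
        · exact h
        · rw [hnone _ h.1] at h; exact Bool.noConfusion h.2
      rw [← hsl, ← hn', ← hL, ← hm0, ← hres, hres0, hm0, hslen]
    · -- greedy found the least valid mask
      rcases pvGo_valid vals [] cs hfold with ⟨bs, rfl, hv⟩
      have hblen : bs.length = n := by rw [pvValid_length bs vals [] hv, hvlen]
      have hchk : pvCheck sl (pvEnc bs) = true := by
        rw [pvCheck_iff sl bs (by rw [hblen, hn']), ← hvals]; exact hv
      rcases pvFold_char sl L m0 with ⟨hio, hile, himin⟩
      have hub : res ≤ pvEnc bs := himin (pvEnc bs) (pvEnum_mem n hn bs hblen) hchk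
      have hlb : pvEnc bs ≤ res := by
        rcases hio with h | h
        · rw [← hres] at h
          rw [h, hm0, ← hblen]
          exact pvEnc_le_ones bs
        · rcases pvEnum_shape n hn res (by rw [hres]; exact h.1) with ⟨bs', hlen', hres'⟩
          have hv' : pvValid [] bs' vals = true := by
            have := h.2
            rw [← hres, hres'] at this
            rw [pvCheck_iff sl bs' (by rw [hlen', hn'])] at this
            exact this
          have := pvGo_min vals [] (pvEnc bs) bs' hfold hv'
          rw [← hres', not_lt] at this
          exact this
      rw [← hsl, ← hn', ← hL, ← hm0, ← hres]
      exact congrArg String.ofList (le_antisymm hub hlb)
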